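-- pv_equiv track=rewrite | github.com/niekert/neoantigen-pipeline | alphafold_prep.py | tcr_facing_analysis
-- ===== SOURCE A (Python) =====
-- def tcr_facing_analysis(peptide: str, hla_allele: str) -> list[dict]:
--     """
--     Annotate each peptide residue by its role in HLA binding vs TCR recognition.
--
--     For HLA class I, standard 9mer binding conventions:
--     - P2, P9: Primary HLA anchors (buried in the groove, allele-specific pockets)
--     - P1:     N-terminal, partially exposed
--     - P3-P8:  Solvent-exposed face — the part the T-cell receptor actually sees
--               P5 is the central TCR contact (most immunogenic position)
--     - P8:     Secondary anchor for some alleles (partially buried)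
--
--     For 8mers and 10mers, positions shift slightly but P2 and P-omega remain anchors.
--     """
--     n = len(peptide)
--     residues = []
--
--     for i, aa in enumerate(peptide):
--         pos = i + 1  # 1-indexed (P1, P2, ...)
--         p_omega = n   # last position
--
--         if pos == 2:
--             role = "HLA ANCHOR"
--             note = "buried in B pocket — allele-specific"
--         elif pos == p_omega:
--             role = "HLA ANCHOR"
--             note = "buried in F pocket — C-terminal anchor"
--         elif pos == 1:
--             role = "partial exposure"
--             note = "N-terminal, partially visible"
--         elif pos == n - 1:
--             role = "partial anchor"
--             note = "secondary anchor for some alleles"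
--         elif pos == (n // 2) + 1:
--             role = "TCR-FACING ★"
--             note = "central position — primary TCR contact"
--         else:
--             role = "TCR-FACING"
--             note = "solvent-exposed, visible to T-cell receptor"
--
--         residues.append({
--             "position": f"P{pos}",
--             "amino_acid": aa,
--             "role": role,
--             "note": note,
--         })
--
--     return residues
-- ===== SOURCE B (Python) =====
-- def tcr_facing_analysis(peptide: str, hla_allele: str) -> list[dict]:
--     n = len(peptide)
--     if n == 0:
--         return []
--     # Role table indexed 0..n-1, populated in reverse-priority order so the
--     # earliest rule of the original if/elif chain wins any collision.
--     roles = [("TCR-FACING", "solvent-exposed, visible to T-cell receptor")] * n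
--     roles[n // 2] = ("TCR-FACING ★", "central position — primary TCR contact")
--     if n >= 2:
--         roles[n - 2] = ("partial anchor", "secondary anchor for some alleles")
--     roles[0] = ("partial exposure", "N-terminal, partially visible")
--     roles[n - 1] = ("HLA ANCHOR", "buried in F pocket — C-terminal anchor")
--     if n >= 2:
--         roles[1] = ("HLA ANCHOR", "buried in B pocket — allele-specific")
--     return [
--         {"position": f"P{i + 1}", "amino_acid": aa, "role": role, "note": note}
--         for i, (aa, (role, note)) in enumerate(zip(peptide, roles))
--     ]
-- ===== Notes on version B (the rewrite author's own statement) =====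
-- stated objective: alternative
-- what changed: Replaces the per-residue if/elif classification inside the loop by a precomputed positional role table (a list filled with the default and then overridden in reverse-priority order), followed by a single formatting pass over zip(peptide, roles).
import Mathlib
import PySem

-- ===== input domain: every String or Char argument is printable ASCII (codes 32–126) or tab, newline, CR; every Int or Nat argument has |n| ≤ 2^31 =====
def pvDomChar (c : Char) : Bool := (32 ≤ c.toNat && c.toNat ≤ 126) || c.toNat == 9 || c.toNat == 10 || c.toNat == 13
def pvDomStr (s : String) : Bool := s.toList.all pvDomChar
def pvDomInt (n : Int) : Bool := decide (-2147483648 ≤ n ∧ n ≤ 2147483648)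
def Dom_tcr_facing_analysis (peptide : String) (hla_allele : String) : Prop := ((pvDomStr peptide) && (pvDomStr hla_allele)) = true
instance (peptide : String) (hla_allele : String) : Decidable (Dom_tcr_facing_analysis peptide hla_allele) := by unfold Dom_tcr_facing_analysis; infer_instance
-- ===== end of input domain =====

-- B replaces A's per-residue if/elif chain by a precomputed positional role table
-- (defaults then reverse-priority overrides) and one formatting pass (objective: alternative).

-- ===== PORT A =====
-- literal transliteration of A: one loop over enumerate(peptide), if/elif chain inside,
-- appending one dict (assoc list in key insertion order) per residue
def tcr_facing_analysis (peptide : String) (hla_allele : String) : List (List (String × String)) :=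
  let n : Int := PySem.Str.len peptide
  (PySem.List.enumerate peptide.toList).foldl (fun residues iaa =>
    let pos : Int := iaa.1 + 1
    let p_omega : Int := n
    let rn : String × String :=
      if pos = 2 then ("HLA ANCHOR", "buried in B pocket — allele-specific")
      else if pos = p_omega then ("HLA ANCHOR", "buried in F pocket — C-terminal anchor")
      else if pos = 1 then ("partial exposure", "N-terminal, partially visible")
      else if pos = n - 1 then ("partial anchor", "secondary anchor for some alleles")
      else if pos = PySem.Int.floordiv n 2 + 1 then ("TCR-FACING ★", "central position — primary TCR contact")
      else ("TCR-FACING", "solvent-exposed, visible to T-cell receptor")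
    residues ++ [[("position", "P" ++ PySem.Int.toStr pos),
                  ("amino_acid", String.mk [iaa.2]),
                  ("role", rn.1), ("note", rn.2)]]) []

-- ===== PORT B =====
-- transliteration of Source B; all table indices (n/2, n-2, 0, n-1, 1) are non-negative and
-- < n under the guards, so Python's roles[k] = v is exactly List.set with a Nat index
def tcr_facing_analysis_alt (peptide : String) (hla_allele : String) : List (List (String × String)) :=
  let cs := peptide.toList
  let n := cs.length
  if n = 0 then []
  else
    let roles := List.replicate n (("TCR-FACING", "solvent-exposed, visible to T-cell receptor") : String × String)
    let roles := roles.set (n / 2) ("TCR-FACING ★", "central position — primary TCR contact")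
    let roles := if 2 ≤ n then roles.set (n - 2) ("partial anchor", "secondary anchor for some alleles") else roles
    let roles := roles.set 0 ("partial exposure", "N-terminal, partially visible")
    let roles := roles.set (n - 1) ("HLA ANCHOR", "buried in F pocket — C-terminal anchor")
    let roles := if 2 ≤ n then roles.set 1 ("HLA ANCHOR", "buried in B pocket — allele-specific") else roles
    (PySem.List.enumerate (cs.zip roles)).map (fun irow =>
      [("position", "P" ++ PySem.Int.toStr (irow.1 + 1)),
       ("amino_acid", String.mk [irow.2.1]),
       ("role", irow.2.2.1), ("note", irow.2.2.2)])

-- ===== PRECONDITION & SPEC =====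
def Spec_tcr_facing_analysis (peptide : String) (hla_allele : String) (out : List (List (String × String))) : Prop := out = tcr_facing_analysis_alt peptide hla_allele
instance (peptide : String) (hla_allele : String) (out : List (List (String × String))) : Decidable (Spec_tcr_facing_analysis peptide hla_allele out) := by unfold Spec_tcr_facing_analysis; infer_instance

-- ===== CLAIM (what is proved, stated in full; the proofs are below) =====
def Claim_equal_tcr_facing_analysis : Prop := ∀ (peptide : String) (hla_allele : String), Dom_tcr_facing_analysis peptide hla_allele → Spec_tcr_facing_analysis peptide hla_allele (tcr_facing_analysis peptide hla_allele)

-- ===== LEMMAS AND PROOFS =====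

-- A's if/elif chain at 1-indexed position k+1 agrees with B's table entry at k (n ≥ 2)
theorem pv_role_eq (n k : Nat) (hn2 : 2 ≤ n) (hk : k < n) :
    (if (0:Int) + (k:Int) + 1 = 2 then (("HLA ANCHOR" : String), ("buried in B pocket — allele-specific" : String))
     else if (0:Int) + (k:Int) + 1 = (n:Int) then ("HLA ANCHOR", "buried in F pocket — C-terminal anchor")
     else if (0:Int) + (k:Int) + 1 = 1 then ("partial exposure", "N-terminal, partially visible")
     else if (0:Int) + (k:Int) + 1 = (n:Int) - 1 then ("partial anchor", "secondary anchor for some alleles")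
     else if (0:Int) + (k:Int) + 1 = ((n / 2 : Nat) : Int) + 1 then ("TCR-FACING ★", "central position — primary TCR contact")
     else ("TCR-FACING", "solvent-exposed, visible to T-cell receptor"))
  = (if 1 = k then (("HLA ANCHOR" : String), ("buried in B pocket — allele-specific" : String))
     else if n - 1 = k then ("HLA ANCHOR", "buried in F pocket — C-terminal anchor")
     else if 0 = k then ("partial exposure", "N-terminal, partially visible")
     else if n - 2 = k then ("partial anchor", "secondary anchor for some alleles")
     else if n / 2 = k then ("TCR-FACING ★", "central position — primary TCR contact")
     else ("TCR-FACING", "solvent-exposed, visible to T-cell receptor")) := by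
  split_ifs <;> first | rfl | (exfalso; omega)

-- same for n = 1 (the table gets no P2 / secondary-anchor overrides)
theorem pv_role_eq_one (n k : Nat) (hn2 : ¬ 2 ≤ n) (hk : k < n) :
    (if (0:Int) + (k:Int) + 1 = 2 then (("HLA ANCHOR" : String), ("buried in B pocket — allele-specific" : String))
     else if (0:Int) + (k:Int) + 1 = (n:Int) then ("HLA ANCHOR", "buried in F pocket — C-terminal anchor")
     else if (0:Int) + (k:Int) + 1 = 1 then ("partial exposure", "N-terminal, partially visible")
     else if (0:Int) + (k:Int) + 1 = (n:Int) - 1 then ("partial anchor", "secondary anchor for some alleles")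
     else if (0:Int) + (k:Int) + 1 = ((n / 2 : Nat) : Int) + 1 then ("TCR-FACING ★", "central position — primary TCR contact")
     else ("TCR-FACING", "solvent-exposed, visible to T-cell receptor"))
  = (if n - 1 = k then (("HLA ANCHOR" : String), ("buried in F pocket — C-terminal anchor" : String))
     else if 0 = k then ("partial exposure", "N-terminal, partially visible")
     else if n / 2 = k then ("TCR-FACING ★", "central position — primary TCR contact")
     else ("TCR-FACING", "solvent-exposed, visible to T-cell receptor")) := by
  split_ifs <;> first | rfl | (exfalso; omega)

-- getElem? of PySem.List.enumerate
theorem pv_enumerate_getElem? {α : Type} (xs : List α) (s : Int) (k : Nat) :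
    (PySem.List.enumerate xs s)[k]? = xs[k]?.map (fun a => (s + (k : Int), a)) := by
  induction xs generalizing s k with
  | nil => simp [PySem.List.enumerate]
  | cons x xs ih =>
    rw [PySem.List.enumerate_cons]
    cases k with
    | zero => simp
    | succ k =>
      simp only [List.getElem?_cons_succ, ih (s + 1) k]
      cases xs[k]? <;> simp <;> ring

-- ===== VERDICT (by name: the statement is the Claim_ definition above) =====
theorem tcr_facing_analysis_spec : Claim_equal_tcr_facing_analysis := by
  intro peptide hla_allele _
  unfold Spec_tcr_facing_analysis tcr_facing_analysis tcr_facing_analysis_alt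
  simp only [PySem.Str.len_eq, PySem.List.foldl_append_singleton_eq_map, List.nil_append]
  by_cases h0 : peptide.toList.length = 0
  · simp [List.length_eq_zero_iff.mp h0]
  · rw [if_neg h0]
    have hfd : PySem.Int.floordiv (peptide.toList.length : Int) 2
        = ((peptide.toList.length / 2 : Nat) : Int) :=
      PySem.Int.floordiv_natCast peptide.toList.length 2
    apply List.ext_getElem?
    intro k
    simp only [List.getElem?_map, pv_enumerate_getElem?]
    by_cases hk : k < peptide.toList.length
    · rw [List.getElem?_eq_getElem hk,
        List.getElem?_eq_getElem (l := List.zip _ _) (by simp only [List.length_zip, apply_ite List.length, List.length_set, List.length_replicate, ite_self]; omega)]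
      simp only [Option.map_some, List.getElem_zip, Option.some.injEq, hfd]
      by_cases hn2 : 2 ≤ peptide.toList.length
      · simp only [hn2, ite_true, List.getElem_set, List.getElem_replicate]
        rw [pv_role_eq peptide.toList.length k hn2 hk]
      · simp only [hn2, ite_false, List.getElem_set, List.getElem_replicate]
        rw [pv_role_eq_one peptide.toList.length k hn2 hk]
    · rw [List.getElem?_eq_none (by omega),
        List.getElem?_eq_none (l := List.zip _ _) (by simp only [List.length_zip, apply_ite List.length, List.length_set, List.length_replicate, ite_self]; omega)]
      simp
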